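-- pv_equiv track=rewrite | github.com/arpi2003ta/OMR_ANSWER_DETECTION | omr_processor.py | show_score_for_each_subject
-- ===== SOURCE A (Python) =====
-- def show_score_for_each_subject(result):
--     """Calculate scores for each subject"""
--     Chem = {}
--     Phy = {}
--     Bio = {}
--
--     for k, v in enumerate(result):
--         s = k + 1
--         if s <= 50:
--             Chem[s] = v
--         elif s <= 100:
--             Phy[s] = v
--         elif s <= 201:
--             Bio[s] = v
--
--     return {'Chemistry': Chem, 'Physics': Phy, 'Biology': Bio}
-- ===== SOURCE B (Python) =====
-- def show_score_for_each_subject(result):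
--     """Calculate scores for each subject"""
--     it = iter(result)
--
--     def take(lo, hi):
--         return dict(zip(range(lo, hi + 1), it))
--
--     return {'Chemistry': take(1, 50),
--             'Physics': take(51, 100),
--             'Biology': take(101, 201)}
-- ===== Notes on version B (the rewrite author's own statement) =====
-- stated objective: simpler
-- what changed: Replaces the per-element branching loop over enumerate(result) with a single shared iterator consumed in three stages by zipping it with the key ranges 1..50, 51..100 and 101..201; zip's stop-at-shorter rule replaces all index comparisons.
import Mathlib
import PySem

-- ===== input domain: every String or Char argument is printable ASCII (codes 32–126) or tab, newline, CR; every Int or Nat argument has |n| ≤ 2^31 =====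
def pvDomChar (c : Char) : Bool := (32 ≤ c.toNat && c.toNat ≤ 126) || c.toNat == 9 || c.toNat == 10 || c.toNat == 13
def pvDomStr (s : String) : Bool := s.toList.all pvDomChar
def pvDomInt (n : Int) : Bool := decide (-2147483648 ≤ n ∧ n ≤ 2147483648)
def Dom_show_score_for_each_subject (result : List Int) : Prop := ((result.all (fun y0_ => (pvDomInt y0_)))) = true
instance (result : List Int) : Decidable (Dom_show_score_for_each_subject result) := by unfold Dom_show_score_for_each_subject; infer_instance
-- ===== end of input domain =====

-- B drops A's per-element branching loop: a single iterator over the input is consumed in three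
-- stages by zipping it with the key ranges 1..50, 51..100, 101..201 (objective: simpler).

-- ===== PORT A =====
-- one loop over enumerate(result), branching on s = k+1 into three dicts
def pvStepA (acc : PySem.Dict Int Int × PySem.Dict Int Int × PySem.Dict Int Int)
    (kv : Int × Int) : PySem.Dict Int Int × PySem.Dict Int Int × PySem.Dict Int Int :=
  let s := kv.1 + 1
  if s ≤ 50 then (acc.1.insert s kv.2, acc.2.1, acc.2.2)
  else if s ≤ 100 then (acc.1, acc.2.1.insert s kv.2, acc.2.2)
  else if s ≤ 201 then (acc.1, acc.2.1, acc.2.2.insert s kv.2)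
  else acc

def show_score_for_each_subject (result : List Int) : List (String × List (Int × Int)) :=
  let st := (PySem.List.enumerate result 0).foldl pvStepA
    (PySem.Dict.empty, PySem.Dict.empty, PySem.Dict.empty)
  [("Chemistry", st.1.items), ("Physics", st.2.1.items), ("Biology", st.2.2.items)]

-- ===== PORT B =====
-- take(lo, hi) zips range(lo, hi+1) with the shared iterator: zip stops at the shorter side, so it
-- consumes min(hi+1-lo, remaining) elements; the iterator is modelled as the not-yet-consumed list.
-- dict(zip(keys, it)) over the distinct increasing range keys has exactly the zipped pairs as items.
def pvTake (lo hi : Int) (xs : List Int) : List (Int × Int) × List Int :=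
  let keys := PySem.List.pyRange lo (hi + 1) 1
  (keys.zip xs, xs.drop keys.length)

def show_score_for_each_subject_alt (result : List Int) : List (String × List (Int × Int)) :=
  let c := pvTake 1 50 result
  let p := pvTake 51 100 c.2
  let b := pvTake 101 201 p.2
  [("Chemistry", c.1), ("Physics", p.1), ("Biology", b.1)]

-- ===== PRECONDITION & SPEC =====
def Spec_show_score_for_each_subject (result : List Int) (out : List (String × List (Int × Int))) : Prop := out = show_score_for_each_subject_alt result
instance (result : List Int) (out : List (String × List (Int × Int))) : Decidable (Spec_show_score_for_each_subject result out) := by unfold Spec_show_score_for_each_subject; infer_instance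

-- ===== CLAIM (what is proved, stated in full; the proofs are below) =====
def Claim_equal_show_score_for_each_subject : Prop := ∀ (result : List Int), Dom_show_score_for_each_subject result → Spec_show_score_for_each_subject result (show_score_for_each_subject result)

-- ===== LEMMAS AND PROOFS =====

-- the per-component step functions of A's loop
def pvStepC (d : PySem.Dict Int Int) (kv : Int × Int) : PySem.Dict Int Int :=
  if kv.1 + 1 ≤ 50 then d.insert (kv.1 + 1) kv.2 else d
def pvStepP (d : PySem.Dict Int Int) (kv : Int × Int) : PySem.Dict Int Int :=
  if kv.1 + 1 ≤ 50 then d else if kv.1 + 1 ≤ 100 then d.insert (kv.1 + 1) kv.2 else d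
def pvStepB (d : PySem.Dict Int Int) (kv : Int × Int) : PySem.Dict Int Int :=
  if kv.1 + 1 ≤ 50 then d else if kv.1 + 1 ≤ 100 then d
  else if kv.1 + 1 ≤ 201 then d.insert (kv.1 + 1) kv.2 else d

lemma pvStepA_eq (acc : PySem.Dict Int Int × PySem.Dict Int Int × PySem.Dict Int Int)
    (kv : Int × Int) :
    pvStepA acc kv = (pvStepC acc.1 kv, pvStepP acc.2.1 kv, pvStepB acc.2.2 kv) := by
  simp only [pvStepA, pvStepC, pvStepP, pvStepB]
  split_ifs <;> rfl

lemma pv_fold_split (l : List (Int × Int)) (c p b : PySem.Dict Int Int) :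
    l.foldl pvStepA (c, p, b) = (l.foldl pvStepC c, l.foldl pvStepP p, l.foldl pvStepB b) := by
  induction l generalizing c p b with
  | nil => rfl
  | cons kv t ih => simp only [List.foldl_cons, pvStepA_eq, ih]

-- A's segments of enumerate(result)
lemma pv_decomp (result : List Int) :
    result = result.take 50 ++ ((result.drop 50).take 50 ++ ((result.drop 100).take 101 ++ result.drop 201)) := by
  have h1 : (result.drop 100).take 101 ++ result.drop 201 = result.drop 100 := by
    have := List.take_append_drop 101 (result.drop 100)
    simpa [List.drop_drop] using this
  have h2 : (result.drop 50).take 50 ++ result.drop 100 = result.drop 50 := by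
    have := List.take_append_drop 50 (result.drop 50)
    simpa [List.drop_drop] using this
  rw [h1, h2, List.take_append_drop]

lemma pv_filter_true {P : Int × Int → Bool} {l : List (Int × Int)}
    (h : ∀ kv ∈ l, P kv = true) : l.filter P = l := List.filter_eq_self.mpr h

lemma pv_filter_false {P : Int × Int → Bool} {l : List (Int × Int)}
    (h : ∀ kv ∈ l, P kv = false) : l.filter P = [] := by
  rw [List.filter_eq_nil_iff]; intro kv hm; simp [h kv hm]

-- keys of an enumerate segment, shifted by 1, are distinct
lemma pv_nodup_keys (xs : List Int) (s : Int) :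
    ((PySem.List.enumerate xs s).map (fun kv => kv.1 + 1)).Nodup := by
  have hp := PySem.List.pairwise_lt_enumerate xs s
  exact hp.map _ (fun a b h => by omega)

-- a loop of inserts over an enumerate segment (fresh, increasing keys) collects its pairs
lemma pv_insert_items (seg : List Int) (s : Int) :
    ((PySem.List.enumerate seg s).foldl (fun d kv => d.insert (kv.1 + 1) kv.2)
        (PySem.Dict.empty : PySem.Dict Int Int)).items
      = (PySem.List.enumerate seg s).map (fun kv => (kv.1 + 1, kv.2)) := by
  rw [PySem.Dict.items_foldl_insert_fresh (PySem.List.enumerate seg s)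
        (fun kv => kv.1 + 1) (fun kv => kv.2) PySem.Dict.empty
        (fun a _ => PySem.Dict.contains_empty _) (pv_nodup_keys seg s)]
  simp [PySem.Dict.empty]

-- zip only sees the first ks.length elements of the right list
lemma pv_zip_take (ks xs : List Int) : ks.zip xs = ks.zip (xs.take ks.length) := by
  induction ks generalizing xs with
  | nil => simp
  | cons k ks ih =>
    cases xs with
    | nil => simp
    | cons x xs => simp [List.zip_cons_cons, ih xs]

-- zipping a long-enough key range with a list is the shifted enumerate
lemma pv_zip_enum (xs : List Int) (s b : Int) (h : s + 1 + xs.length ≤ b) :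
    (PySem.List.pyRange (s+1) b 1).zip xs
      = (PySem.List.enumerate xs s).map (fun kv => (kv.1 + 1, kv.2)) := by
  induction xs generalizing s with
  | nil => simp [PySem.List.enumerate_nil]
  | cons x xs ih =>
    have hlt : s + 1 < b := by simp at h; omega
    rw [PySem.List.pyRange_one_cons hlt, PySem.List.enumerate_cons]
    simp only [List.zip_cons_cons, List.map_cons]
    congr 1
    have := ih (s + 1) (by simp at h ⊢; omega)
    simpa using this

theorem pv_main (result : List Int) :
    show_score_for_each_subject result = show_score_for_each_subject_alt result := by
  -- boolean predicates of A's three branches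
  set Pc : Int × Int → Bool := fun kv => decide (kv.1 + 1 ≤ 50) with hPc
  set Pp : Int × Int → Bool := fun kv => decide (¬ (kv.1 + 1 ≤ 50) ∧ kv.1 + 1 ≤ 100) with hPp
  set Pb : Int × Int → Bool :=
    fun kv => decide (¬ (kv.1 + 1 ≤ 50) ∧ ¬ (kv.1 + 1 ≤ 100) ∧ kv.1 + 1 ≤ 201) with hPb
  have hstepC : pvStepC = fun d kv => if Pc kv then d.insert (kv.1 + 1) kv.2 else d := by
    funext d kv; simp [pvStepC, hPc]
  have hstepP : pvStepP = fun d kv => if Pp kv then d.insert (kv.1 + 1) kv.2 else d := by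
    funext d kv; simp only [pvStepP, hPp, decide_eq_true_eq]
    split_ifs <;> simp_all
  have hstepB : pvStepB = fun d kv => if Pb kv then d.insert (kv.1 + 1) kv.2 else d := by
    funext d kv; simp only [pvStepB, hPb, decide_eq_true_eq]
    split_ifs <;> simp_all
  -- segments
  set t1 := result.take 50 with ht1
  set t2 := (result.drop 50).take 50 with ht2
  set t3 := (result.drop 100).take 101 with ht3
  set t4 := result.drop 201 with ht4
  have hdec : result = t1 ++ (t2 ++ (t3 ++ t4)) := pv_decomp result
  set L := result.length with hL
  have hlen1 : t1.length = min 50 L := by simp [ht1, hL]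
  have hlen2 : t2.length = min 50 (L - 50) := by simp [ht2, hL]
  have hlen3 : t3.length = min 101 (L - 100) := by simp [ht3, hL]
  -- enumerate of the decomposition
  have henum : PySem.List.enumerate result 0 =
      PySem.List.enumerate t1 0 ++
      (PySem.List.enumerate t2 (0 + ↑t1.length) ++
       (PySem.List.enumerate t3 ((0 + ↑t1.length) + ↑t2.length) ++
        PySem.List.enumerate t4 (((0 + ↑t1.length) + ↑t2.length) + ↑t3.length))) := by
    conv_lhs => rw [hdec]
    rw [PySem.List.enumerate_append, PySem.List.enumerate_append, PySem.List.enumerate_append]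
  -- membership facts: which branch each segment's indices take
  have hm1c : ∀ kv ∈ PySem.List.enumerate t1 0, Pc kv = true := by
    intro kv hm; rw [PySem.List.mem_enumerate_iff] at hm; obtain ⟨k, hk, rfl⟩ := hm
    rw [hlen1] at hk; simp only [hPc, decide_eq_true_eq]; omega
  have hm1p : ∀ kv ∈ PySem.List.enumerate t1 0, Pp kv = false := by
    intro kv hm; rw [PySem.List.mem_enumerate_iff] at hm; obtain ⟨k, hk, rfl⟩ := hm
    rw [hlen1] at hk; simp only [hPp, decide_eq_false_iff_not]; omega
  have hm1b : ∀ kv ∈ PySem.List.enumerate t1 0, Pb kv = false := by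
    intro kv hm; rw [PySem.List.mem_enumerate_iff] at hm; obtain ⟨k, hk, rfl⟩ := hm
    rw [hlen1] at hk; simp only [hPb, decide_eq_false_iff_not]; omega
  have hm2c : ∀ kv ∈ PySem.List.enumerate t2 (0 + ↑t1.length), Pc kv = false := by
    intro kv hm; rw [PySem.List.mem_enumerate_iff] at hm; obtain ⟨k, hk, rfl⟩ := hm
    rw [hlen2] at hk; simp only [hPc, decide_eq_false_iff_not, hlen1]; omega
  have hm2p : ∀ kv ∈ PySem.List.enumerate t2 (0 + ↑t1.length), Pp kv = true := by
    intro kv hm; rw [PySem.List.mem_enumerate_iff] at hm; obtain ⟨k, hk, rfl⟩ := hm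
    rw [hlen2] at hk; simp only [hPp, decide_eq_true_eq, hlen1]; omega
  have hm2b : ∀ kv ∈ PySem.List.enumerate t2 (0 + ↑t1.length), Pb kv = false := by
    intro kv hm; rw [PySem.List.mem_enumerate_iff] at hm; obtain ⟨k, hk, rfl⟩ := hm
    rw [hlen2] at hk; simp only [hPb, decide_eq_false_iff_not, hlen1]; omega
  have hm3c : ∀ kv ∈ PySem.List.enumerate t3 ((0 + ↑t1.length) + ↑t2.length), Pc kv = false := by
    intro kv hm; rw [PySem.List.mem_enumerate_iff] at hm; obtain ⟨k, hk, rfl⟩ := hm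
    rw [hlen3] at hk; simp only [hPc, decide_eq_false_iff_not, hlen1, hlen2]; omega
  have hm3p : ∀ kv ∈ PySem.List.enumerate t3 ((0 + ↑t1.length) + ↑t2.length), Pp kv = false := by
    intro kv hm; rw [PySem.List.mem_enumerate_iff] at hm; obtain ⟨k, hk, rfl⟩ := hm
    rw [hlen3] at hk; simp only [hPp, decide_eq_false_iff_not, hlen1, hlen2]; omega
  have hm3b : ∀ kv ∈ PySem.List.enumerate t3 ((0 + ↑t1.length) + ↑t2.length), Pb kv = true := by
    intro kv hm; rw [PySem.List.mem_enumerate_iff] at hm; obtain ⟨k, hk, rfl⟩ := hm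
    rw [hlen3] at hk; simp only [hPb, decide_eq_true_eq, hlen1, hlen2]; omega
  have hlen4 : t4.length = L - 201 := by simp [ht4, hL]
  have hm4c : ∀ kv ∈ PySem.List.enumerate t4 (((0 + ↑t1.length) + ↑t2.length) + ↑t3.length), Pc kv = false := by
    intro kv hm; rw [PySem.List.mem_enumerate_iff] at hm; obtain ⟨k, hk, rfl⟩ := hm
    rw [hlen4] at hk; simp only [hPc, decide_eq_false_iff_not, hlen1, hlen2, hlen3]; omega
  have hm4p : ∀ kv ∈ PySem.List.enumerate t4 (((0 + ↑t1.length) + ↑t2.length) + ↑t3.length), Pp kv = false := by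
    intro kv hm; rw [PySem.List.mem_enumerate_iff] at hm; obtain ⟨k, hk, rfl⟩ := hm
    rw [hlen4] at hk; simp only [hPp, decide_eq_false_iff_not, hlen1, hlen2, hlen3]; omega
  have hm4b : ∀ kv ∈ PySem.List.enumerate t4 (((0 + ↑t1.length) + ↑t2.length) + ↑t3.length), Pb kv = false := by
    intro kv hm; rw [PySem.List.mem_enumerate_iff] at hm; obtain ⟨k, hk, rfl⟩ := hm
    rw [hlen4] at hk; simp only [hPb, decide_eq_false_iff_not, hlen1, hlen2, hlen3]; omega
  -- the three filters pick out exactly the three segments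
  have hfc : (PySem.List.enumerate result 0).filter Pc = PySem.List.enumerate t1 0 := by
    rw [henum]; simp only [List.filter_append]
    rw [pv_filter_true hm1c, pv_filter_false hm2c, pv_filter_false hm3c, pv_filter_false hm4c]
    simp
  have hfp : (PySem.List.enumerate result 0).filter Pp =
      PySem.List.enumerate t2 (0 + ↑t1.length) := by
    rw [henum]; simp only [List.filter_append]
    rw [pv_filter_false hm1p, pv_filter_true hm2p, pv_filter_false hm3p, pv_filter_false hm4p]
    simp
  have hfb : (PySem.List.enumerate result 0).filter Pb =
      PySem.List.enumerate t3 ((0 + ↑t1.length) + ↑t2.length) := by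
    rw [henum]; simp only [List.filter_append]
    rw [pv_filter_false hm1b, pv_filter_false hm2b, pv_filter_true hm3b, pv_filter_false hm4b]
    simp
  -- B's three staged zips are the shifted enumerates of the same segments
  have hkl1 : (PySem.List.pyRange 1 (50 + 1) 1).length = 50 := by
    rw [PySem.List.length_pyRange_one]; decide
  have hkl2 : (PySem.List.pyRange 51 (100 + 1) 1).length = 50 := by
    rw [PySem.List.length_pyRange_one]; decide
  have hkl3 : (PySem.List.pyRange 101 (201 + 1) 1).length = 101 := by
    rw [PySem.List.length_pyRange_one]; decide
  have hchem : (PySem.List.pyRange 1 (50 + 1) 1).zip result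
      = (PySem.List.enumerate t1 0).map (fun kv => (kv.1 + 1, kv.2)) := by
    rw [pv_zip_take, hkl1, ← ht1]
    have := pv_zip_enum t1 0 51 (by rw [hlen1]; push_cast; omega)
    norm_num at this ⊢; exact this
  have hphy : (PySem.List.pyRange 51 (100 + 1) 1).zip (result.drop 50)
      = (PySem.List.enumerate t2 (0 + ↑t1.length)).map (fun kv => (kv.1 + 1, kv.2)) := by
    rw [pv_zip_take, hkl2, ← ht2]
    by_cases h : 50 ≤ L
    · have h1 : t1.length = 50 := by omega
      have := pv_zip_enum t2 50 101 (by rw [hlen2]; push_cast; omega)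
      rw [h1]; norm_num at this ⊢; exact this
    · have ht2nil : t2 = [] := by
        rw [ht2, List.drop_eq_nil_iff.mpr (by omega : result.length ≤ 50)]; rfl
      rw [ht2nil]; simp [PySem.List.enumerate_nil]
  have hbio : (PySem.List.pyRange 101 (201 + 1) 1).zip ((result.drop 50).drop 50)
      = (PySem.List.enumerate t3 ((0 + ↑t1.length) + ↑t2.length)).map (fun kv => (kv.1 + 1, kv.2)) := by
    rw [List.drop_drop, pv_zip_take, hkl3]
    norm_num
    rw [← ht3]
    by_cases h : 100 ≤ L
    · have h1 : t1.length = 50 := by omega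
      have h2 : t2.length = 50 := by omega
      have := pv_zip_enum t3 100 202 (by rw [hlen3]; push_cast; omega)
      rw [h1, h2]; norm_num at this ⊢; exact this
    · have ht3nil : t3 = [] := by
        rw [ht3, List.drop_eq_nil_iff.mpr (by omega : result.length ≤ 100)]; rfl
      rw [ht3nil]; simp [PySem.List.enumerate_nil]
  -- assemble
  simp only [show_score_for_each_subject, show_score_for_each_subject_alt, pvTake]
  rw [pv_fold_split, hstepC, hstepP, hstepB]
  rw [← List.foldl_filter, ← List.foldl_filter, ← List.foldl_filter, hfc, hfp, hfb]
  simp only [pv_insert_items, hchem]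
  rw [hkl1, hkl2, hphy, hbio]

-- ===== VERDICT (by name: the statement is the Claim_ definition above) =====
theorem show_score_for_each_subject_spec : Claim_equal_show_score_for_each_subject := by
  intro result _
  exact pv_main result
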